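-- pv_equiv track=rewrite | github.com/pkubiak/advent-of-code-2020 | 2023/day22/ab.py | count_above
-- ===== SOURCE A (Python) =====
-- def count_above(hierarchy, bid):
--     fallen = {bid}
--     while True:
--         start = len(fallen)
--         new_fallen = set()
--         for i in hierarchy:
--             if i not in fallen and len(hierarchy[i] - fallen) == 0:
--                 new_fallen.add(i)
--
--         fallen.update(new_fallen)
--         end = len(fallen)
--         if start == end:
--             break
--
--     return len(fallen) - 1
-- ===== SOURCE B (Python) =====
-- def count_above(hierarchy, bid):
--     # Kahn-style cascade: a brick falls once every one of its supporters has
--     # fallen; per-brick counters of still-standing supporters are decremented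
--     # along reverse edges, so each fall is propagated once.
--     remaining = {i: len(sup) for i, sup in hierarchy.items()}
--     dependents = {}
--     for i, sup in hierarchy.items():
--         for s in sup:
--             dependents.setdefault(s, []).append(i)
--     fallen = {i for i, r in remaining.items() if r == 0}
--     fallen.add(bid)
--     queue = list(fallen)
--     while queue:
--         u = queue.pop()
--         for j in dependents.get(u, []):
--             if j not in fallen:
--                 remaining[j] -= 1
--                 if remaining[j] == 0:
--                     fallen.add(j)
--                     queue.append(j)
--     return len(fallen) - 1
-- ===== Notes on version B (the rewrite author's own statement) =====
-- stated objective: alternative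
-- what changed: A repeatedly rescans every brick and recomputes a whole set difference against the fallen set until a round adds nothing; B is a Kahn-style worklist that keeps a remaining-standing-supporter counter per brick and a reverse (supporter -> dependents) index built once, so each brick's fall is propagated along its outgoing edges exactly once.
import Mathlib
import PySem

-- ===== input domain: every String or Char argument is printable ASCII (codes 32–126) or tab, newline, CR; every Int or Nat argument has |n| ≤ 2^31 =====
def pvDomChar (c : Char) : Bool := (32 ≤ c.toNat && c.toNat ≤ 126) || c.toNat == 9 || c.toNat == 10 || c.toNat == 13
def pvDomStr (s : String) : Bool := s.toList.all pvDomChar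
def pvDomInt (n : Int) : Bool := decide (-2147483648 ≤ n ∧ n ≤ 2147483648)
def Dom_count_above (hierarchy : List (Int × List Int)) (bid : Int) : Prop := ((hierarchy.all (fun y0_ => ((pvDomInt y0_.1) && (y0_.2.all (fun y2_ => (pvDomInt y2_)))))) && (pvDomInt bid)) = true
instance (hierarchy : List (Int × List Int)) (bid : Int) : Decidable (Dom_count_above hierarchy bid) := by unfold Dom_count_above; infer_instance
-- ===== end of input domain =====

-- B replaces A's repeated full rescans (recomputing a set difference per brick per round)
-- by a Kahn-style worklist with per-brick remaining-supporter counters and a reverse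
-- (supporter -> dependents) index built once (objective: alternative algorithm, same value).

-- Both Pythons receive `hierarchy` as a dict[int, set[int]]; the List (Int × List Int)
-- argument is turned into that dict here exactly as the harness builds the Python
-- argument (first binding wins, value lists become sets).  Shared by both ports.
def pyDictOf (hierarchy : List (Int × List Int)) : PySem.Dict Int (PySem.Set Int) :=
  hierarchy.foldl (fun d p => d.setdefault p.1 (PySem.Set.ofList p.2)) PySem.Dict.empty

-- ===== PORT A =====
-- one round: new_fallen = {i in hierarchy | i not in fallen and len(hierarchy[i] - fallen) == 0}
def aNewFallen (d : PySem.Dict Int (PySem.Set Int)) (fallen : PySem.Set Int) : PySem.Set Int :=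
  d.keys.foldl
    (fun nf i =>
      if !fallen.contains i && PySem.Set.len (PySem.Set.diff (d.getD i PySem.Set.empty) fallen) == 0
      then PySem.Set.add nf i else nf)
    PySem.Set.empty

-- the `while True:` loop; the fuel `keys.length + 1` provably never runs out
-- (each non-final round strictly grows `fallen`, which stays inside bid :: keys)
def aLoop (d : PySem.Dict Int (PySem.Set Int)) : Nat → PySem.Set Int → PySem.Set Int
  | 0, fallen => fallen
  | fuel + 1, fallen =>
    if PySem.Set.len (PySem.Set.update fallen (aNewFallen d fallen)) == PySem.Set.len fallen
    then PySem.Set.update fallen (aNewFallen d fallen)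
    else aLoop d fuel (PySem.Set.update fallen (aNewFallen d fallen))

def count_above (hierarchy : List (Int × List Int)) (bid : Int) : Int :=
  let d := pyDictOf hierarchy
  PySem.Set.len (aLoop d (d.keys.length + 1) (PySem.Set.ofList [bid])) - 1

-- ===== PORT B =====
-- remaining = {i: len(sup) for i, sup in hierarchy.items()}
def bSupCount (d : PySem.Dict Int (PySem.Set Int)) : PySem.Dict Int Int :=
  d.items.foldl (fun r p => r.insert p.1 (PySem.Set.len p.2)) PySem.Dict.empty

-- dependents = {}; for i, sup: for s in sup: dependents.setdefault(s, []).append(i)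
def bDeps (d : PySem.Dict Int (PySem.Set Int)) : PySem.Dict Int (List Int) :=
  d.items.foldl
    (fun r p => p.2.foldl (fun r s => r.modify s [] (fun l => l ++ [p.1])) r)
    PySem.Dict.empty

-- body of `for j in dependents.get(u, []):` — state is (remaining, fallen, queue);
-- `remaining[j]` is written `getD j 0`: j comes from `dependents`, so it is always a key
def bStep (st : PySem.Dict Int Int × PySem.Set Int × List Int) (j : Int) :
    PySem.Dict Int Int × PySem.Set Int × List Int :=
  if st.2.1.contains j then st
  else if st.1.getD j 0 - 1 == 0
  then (st.1.insert j (st.1.getD j 0 - 1), PySem.Set.add st.2.1 j, j :: st.2.2)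
  else (st.1.insert j (st.1.getD j 0 - 1), st.2.1, st.2.2)

-- the `while queue:` loop.  Python's list used as a stack (append/pop at the END) is
-- represented with its top at the HEAD of the Lean list; the fuel `2*n + 2` provably
-- never runs out (every push is paired with a strict growth of `fallen`).
def bLoop (deps : PySem.Dict Int (List Int)) :
    Nat → PySem.Dict Int Int → List Int → PySem.Set Int → PySem.Set Int
  | 0, _, _, fallen => fallen
  | _ + 1, _, [], fallen => fallen
  | fuel + 1, rem, u :: rest, fallen =>
    bLoop deps fuel ((deps.getD u []).foldl bStep (rem, fallen, rest)).1
      ((deps.getD u []).foldl bStep (rem, fallen, rest)).2.2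
      ((deps.getD u []).foldl bStep (rem, fallen, rest)).2.1

def count_above_alt (hierarchy : List (Int × List Int)) (bid : Int) : Int :=
  let d := pyDictOf hierarchy
  let remaining := bSupCount d
  let deps := bDeps d
  let fallen := PySem.Set.add (PySem.Set.ofList
    ((remaining.items.filter (fun p => p.2 == 0)).map (fun p => p.1))) bid
  PySem.Set.len (bLoop deps (2 * d.keys.length + 2) remaining fallen.reverse fallen) - 1

-- ===== PRECONDITION & SPEC =====
def Spec_count_above (hierarchy : List (Int × List Int)) (bid : Int) (out : Int) : Prop := out = count_above_alt hierarchy bid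
instance (hierarchy : List (Int × List Int)) (bid : Int) (out : Int) : Decidable (Spec_count_above hierarchy bid out) := by unfold Spec_count_above; infer_instance

-- ===== CLAIM (what is proved, stated in full; the proofs are below) =====
def Claim_equal_count_above : Prop := ∀ (hierarchy : List (Int × List Int)) (bid : Int), Dom_count_above hierarchy bid → Spec_count_above hierarchy bid (count_above hierarchy bid)

-- ===== LEMMAS AND PROOFS =====

-- the cascade closure both programs compute: x falls iff x = bid or x is a brick all of
-- whose supporters fall
inductive Falls (d : PySem.Dict Int (PySem.Set Int)) (bid : Int) : Int → Prop
  | base : Falls d bid bid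
  | step (i : Int) (S : List Int) : d.get? i = some S → (∀ s, s ∈ S → Falls d bid s) →
      Falls d bid i

theorem nodup_keys_setdefault {ν : Type} (d : PySem.Dict Int ν) (k : Int) (v : ν)
    (h : d.keys.Nodup) : (d.setdefault k v).keys.Nodup := by
  by_cases hc : d.contains k = true
  · rw [PySem.Dict.setdefault_of_contains d v hc]; exact h
  · rw [PySem.Dict.setdefault_of_not_contains d v (by simpa using hc),
      PySem.Dict.keys_insert_of_not_contains d v (by simpa using hc)]
    rw [List.nodup_append]
    refine ⟨h, List.nodup_singleton k, ?_⟩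
    intro a ha b hb
    rw [List.mem_singleton] at hb
    subst hb
    rintro rfl
    exact absurd ((PySem.Dict.contains_iff_mem_keys d a).2 ha) (by simp_all)

theorem nodup_keys_pyDictOf (hierarchy : List (Int × List Int)) :
    (pyDictOf hierarchy).keys.Nodup := by
  unfold pyDictOf
  have h : ∀ (l : List (Int × List Int)) (d : PySem.Dict Int (PySem.Set Int)),
      d.keys.Nodup →
      (l.foldl (fun d p => d.setdefault p.1 (PySem.Set.ofList p.2)) d).keys.Nodup := by
    intro l
    induction l with
    | nil => intro d hd; exact hd
    | cons p l ih =>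
      intro d hd
      exact ih _ (nodup_keys_setdefault d p.1 _ hd)
  exact h hierarchy PySem.Dict.empty PySem.Dict.nodup_keys_empty

theorem mem_keys_iff_get? {ν : Type} (d : PySem.Dict Int ν) (x : Int) :
    x ∈ d.keys ↔ ∃ S, d.get? x = some S := by
  rw [← PySem.Dict.contains_iff_mem_keys, PySem.Dict.contains_eq_isSome_get?]
  exact Option.isSome_iff_exists

-- membership in a "conditionally add" fold
theorem mem_foldl_addIf (p : Int → Bool) (l : List Int) :
    ∀ (nf : PySem.Set Int) (x : Int),
      x ∈ l.foldl (fun nf i => if p i then PySem.Set.add nf i else nf) nf ↔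
        x ∈ nf ∨ (x ∈ l ∧ p x = true) := by
  induction l with
  | nil => intro nf x; simp
  | cons j l ih =>
    intro nf x
    simp only [List.foldl_cons, ih, List.mem_cons]
    by_cases hj : p j = true
    · simp only [hj, if_pos, PySem.Set.mem_add]
      constructor
      · rintro (⟨h | rfl⟩ | ⟨h1, h2⟩)
        · exact Or.inl h
        · exact Or.inr ⟨Or.inl rfl, hj⟩
        · exact Or.inr ⟨Or.inr h1, h2⟩
      · rintro (h | ⟨rfl | h1, h2⟩)
        · exact Or.inl (Or.inl h)
        · exact Or.inl (Or.inr rfl)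
        · exact Or.inr ⟨h1, h2⟩
    · simp only [hj, Bool.false_eq_true]
      constructor
      · rintro (h | ⟨h1, h2⟩)
        · exact Or.inl h
        · exact Or.inr ⟨Or.inr h1, h2⟩
      · rintro (h | ⟨rfl | h1, h2⟩)
        · exact Or.inl h
        · exact absurd h2 hj
        · exact Or.inr ⟨h1, h2⟩

theorem mem_aNewFallen (d : PySem.Dict Int (PySem.Set Int)) (fallen : PySem.Set Int) (x : Int) :
    x ∈ aNewFallen d fallen ↔
      x ∈ d.keys ∧ x ∉ fallen ∧ ∀ s ∈ d.getD x PySem.Set.empty, s ∈ fallen := by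
  unfold aNewFallen
  rw [mem_foldl_addIf]
  have hempty : x ∈ (PySem.Set.empty : PySem.Set Int) ↔ False := by
    simp [PySem.Set.empty]
  rw [hempty, false_or]
  constructor
  · rintro ⟨h1, h2⟩
    simp only [Bool.and_eq_true, Bool.not_eq_true', beq_iff_eq] at h2
    obtain ⟨hc, hd⟩ := h2
    have hnil : PySem.Set.diff (d.getD x PySem.Set.empty) fallen = [] := by
      have hlen : (PySem.Set.diff (d.getD x PySem.Set.empty) fallen).length = 0 := by
        unfold PySem.Set.len at hd
        exact_mod_cast hd
      exact List.length_eq_zero_iff.mp hlen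
    refine ⟨h1, ?_, ?_⟩
    · intro hx
      have hct := (PySem.Set.contains_iff fallen x).2 hx
      rw [hct] at hc
      cases hc
    · intro s hs
      by_contra hns
      have hmem : s ∈ PySem.Set.diff (d.getD x PySem.Set.empty) fallen :=
        (PySem.Set.mem_diff _ _ _).2 ⟨hs, hns⟩
      rw [hnil] at hmem
      cases hmem
  · rintro ⟨h1, h2, h3⟩
    refine ⟨h1, ?_⟩
    simp only [Bool.and_eq_true, Bool.not_eq_true', beq_iff_eq]
    refine ⟨?_, ?_⟩
    · by_contra hcn
      rw [Bool.not_eq_false] at hcn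
      exact h2 ((PySem.Set.contains_iff fallen x).1 hcn)
    · have hnil : PySem.Set.diff (d.getD x PySem.Set.empty) fallen = [] := by
        rw [List.eq_nil_iff_forall_not_mem]
        intro s hs
        rw [PySem.Set.mem_diff] at hs
        exact hs.2 (h3 s hs.1)
      unfold PySem.Set.len
      rw [hnil]
      rfl

theorem aLoop_spec (d : PySem.Dict Int (PySem.Set Int)) (bid : Int) (_hnd : d.keys.Nodup) :
    ∀ (fuel : Nat) (fallen : PySem.Set Int), fallen.Nodup → bid ∈ fallen →
      fallen ⊆ bid :: d.keys → (∀ x ∈ fallen, Falls d bid x) →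
      d.keys.length + 2 ≤ fuel + fallen.length →
      (aLoop d fuel fallen).Nodup ∧
      (∀ x ∈ aLoop d fuel fallen, Falls d bid x) ∧
      bid ∈ aLoop d fuel fallen ∧
      (∀ i S, d.get? i = some S → (∀ s ∈ S, s ∈ aLoop d fuel fallen) → i ∈ aLoop d fuel fallen) := by
  intro fuel
  induction fuel with
  | zero =>
    intro fallen hfnd hbid hsub _ hfuel
    have hle : fallen.length ≤ (bid :: d.keys).length := (hfnd.subperm hsub).length_le
    simp only [List.length_cons] at hle
    omega
  | succ f ih =>
    intro fallen hfnd hbid hsub hsound hfuel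
    have hupd := PySem.Set.update_eq_append_filter fallen (aNewFallen d fallen)
    by_cases hstop :
        (PySem.Set.len (PySem.Set.update fallen (aNewFallen d fallen)) == PySem.Set.len fallen) = true
    · -- stable round: fallen' = fallen, and fallen is closed
      have heq : PySem.Set.update fallen (aNewFallen d fallen) = fallen := by
        have hlen : (PySem.Set.update fallen (aNewFallen d fallen)).length = fallen.length := by
          have := beq_iff_eq.mp hstop
          unfold PySem.Set.len at this
          exact_mod_cast this
        rw [hupd] at hlen ⊢
        rw [List.length_append] at hlen
        have : (List.filter (fun y => !fallen.contains y)
            (PySem.Set.ofList (aNewFallen d fallen))).length = 0 := by omega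
        rw [List.length_eq_zero_iff] at this
        rw [this, List.append_nil]
      have hres : aLoop d (f + 1) fallen = fallen := by
        unfold aLoop
        rw [if_pos hstop, heq]
      rw [hres]
      refine ⟨hfnd, hsound, hbid, ?_⟩
      intro i S hget hSin
      by_contra hni
      have hik : i ∈ d.keys := (mem_keys_iff_get? d i).2 ⟨S, hget⟩
      have hgd : d.getD i PySem.Set.empty = S := PySem.Dict.getD_of_get?_eq_some d _ hget
      have hinew : i ∈ aNewFallen d fallen :=
        (mem_aNewFallen d fallen i).2 ⟨hik, hni, by rw [hgd]; exact hSin⟩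
      have : i ∈ PySem.Set.update fallen (aNewFallen d fallen) :=
        (PySem.Set.mem_update _ _ _).2 (Or.inr hinew)
      rw [heq] at this
      exact hni this
    · -- growing round
      have hres : aLoop d (f + 1) fallen =
          aLoop d f (PySem.Set.update fallen (aNewFallen d fallen)) := by
        conv_lhs => rw [aLoop]
        rw [if_neg hstop]
      rw [hres]
      have hgrow : fallen.length + 1 ≤ (PySem.Set.update fallen (aNewFallen d fallen)).length := by
        rw [hupd, List.length_append]
        rcases Nat.eq_zero_or_pos (List.filter (fun y => !fallen.contains y)
            (PySem.Set.ofList (aNewFallen d fallen))).length with h0 | hpos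
        · exfalso
          apply hstop
          rw [beq_iff_eq]
          unfold PySem.Set.len
          rw [hupd, List.length_append, h0]
          simp
        · omega
      apply ih
      · exact PySem.Set.nodup_update fallen _ hfnd
      · exact (PySem.Set.mem_update _ _ _).2 (Or.inl hbid)
      · intro x hx
        rcases (PySem.Set.mem_update _ _ _).1 hx with h | h
        · exact hsub h
        · exact List.mem_cons_of_mem _ ((mem_aNewFallen d fallen x).1 h).1
      · intro x hx
        rcases (PySem.Set.mem_update _ _ _).1 hx with h | h
        · exact hsound x h
        · obtain ⟨hxk, _, hall⟩ := (mem_aNewFallen d fallen x).1 h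
          obtain ⟨S, hget⟩ := (mem_keys_iff_get? d x).1 hxk
          have hgd : d.getD x PySem.Set.empty = S := PySem.Dict.getD_of_get?_eq_some d _ hget
          exact Falls.step x S hget (fun s hs => hsound s (hall s (by rw [hgd]; exact hs)))
      · omega

-- ---------- B-side proof machinery ----------

-- supporters of j still counted as "not yet processed": processed = fallen \ queue
def cnt (fl st S : List Int) : Nat :=
  S.countP (fun s => !(decide (s ∈ fl) && !decide (s ∈ st)))

theorem cnt_push (fl st S : List Int) (j : Int) (hj : j ∉ fl) :
    cnt (PySem.Set.add fl j) (j :: st) S = cnt fl st S := by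
  unfold cnt
  apply List.countP_congr
  intro s _
  by_cases hsj : s = j
  · subst hsj
    simp [hj]
  · simp [PySem.Set.mem_add, hsj]

theorem cnt_pop (fl rest : List Int) (u : Int) (hu : u ∈ fl) (hur : u ∉ rest) :
    ∀ S : List Int, S.Nodup →
      cnt fl (u :: rest) S = cnt fl rest S + (if u ∈ S then 1 else 0) := by
  intro S
  induction S with
  | nil => intro _; simp [cnt]
  | cons a S ih =>
    intro hnd
    have hS := ih (hnd.of_cons)
    unfold cnt at hS ⊢
    rw [List.countP_cons, List.countP_cons]
    by_cases hau : a = u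
    · subst hau
      have haS : a ∉ S := (List.nodup_cons.mp hnd).1
      rw [if_neg haS] at hS
      have h1 : (!(decide (a ∈ fl) && !decide (a ∈ a :: rest))) = true := by
        simp
      have h2 : (!(decide (a ∈ fl) && !decide (a ∈ rest))) = false := by
        simp [hu, hur]
      rw [h1, h2, hS]
      simp
    · have hua : u ≠ a := fun h => hau h.symm
      have h1 : (decide (a ∈ u :: rest)) = (decide (a ∈ rest)) := by
        simp [List.mem_cons, hau]
      rw [h1]
      have h2 : (u ∈ a :: S) ↔ (u ∈ S) := by
        simp [List.mem_cons, hua]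
      rw [if_congr h2 rfl rfl]
      omega

theorem cnt_eq_zero_iff (fl st S : List Int) :
    cnt fl st S = 0 ↔ ∀ s ∈ S, s ∈ fl ∧ s ∉ st := by
  unfold cnt
  rw [List.countP_eq_zero]
  constructor
  · intro h s hs
    have := h s hs
    simp only [Bool.not_eq_true, Bool.not_eq_false', Bool.and_eq_true, Bool.not_eq_true',
      decide_eq_true_eq, decide_eq_false_iff_not] at this
    simpa using this
  · intro h s hs
    obtain ⟨h1, h2⟩ := h s hs
    simp [h1, h2]

theorem cnt_ne_zero (fl st S : List Int) (h : cnt fl st S ≠ 0) :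
    ∃ s ∈ S, s ∉ fl ∨ s ∈ st := by
  by_contra hall
  push_neg at hall
  apply h
  rw [cnt_eq_zero_iff]
  intro s hs
  exact ⟨(hall s hs).1, (hall s hs).2⟩

theorem cnt_eq_length (fl st S : List Int) (h : ∀ x : Int, x ∈ fl ↔ x ∈ st) :
    cnt fl st S = S.length := by
  unfold cnt
  rw [List.countP_eq_length]
  intro s _
  by_cases hs : s ∈ fl
  · simp [hs, (h s).1 hs]
  · simp [hs]

-- every stored supporter set in pyDictOf is duplicate-free (it is set(...))
theorem values_nodup_pyDictOf (hierarchy : List (Int × List Int)) :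
    ∀ p ∈ (pyDictOf hierarchy).items, p.2.Nodup := by
  unfold pyDictOf
  have h : ∀ (l : List (Int × List Int)) (d : PySem.Dict Int (PySem.Set Int)),
      (∀ p ∈ d.items, p.2.Nodup) →
      ∀ p ∈ (l.foldl (fun d p => d.setdefault p.1 (PySem.Set.ofList p.2)) d).items,
        p.2.Nodup := by
    intro l
    induction l with
    | nil => intro d hd; exact hd
    | cons q l ih =>
      intro d hd
      apply ih
      show ∀ p ∈ (d.setdefault q.1 (PySem.Set.ofList q.2)).items, p.2.Nodup
      by_cases hc : d.contains q.1 = true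
      · rw [PySem.Dict.setdefault_of_contains d _ hc]; exact hd
      · rw [PySem.Dict.setdefault_of_not_contains d _ (by simpa using hc),
          PySem.Dict.items_insert_of_not_contains d _ (by simpa using hc)]
        intro p hp
        rcases List.mem_append.mp hp with h1 | h1
        · exact hd p h1
        · rw [List.mem_singleton] at h1
          subst h1
          exact PySem.Set.nodup_ofList _
  exact h hierarchy PySem.Dict.empty (by simp [PySem.Dict.items, PySem.Dict.empty])

-- exact contents of one dependents bucket
theorem getD_foldl_modify_append (i : Int) :
    ∀ (S : List Int), S.Nodup → ∀ (r : PySem.Dict Int (List Int)) (s : Int),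
      (S.foldl (fun r s' => r.modify s' [] (fun l => l ++ [i])) r).getD s [] =
        r.getD s [] ++ (if s ∈ S then [i] else []) := by
  intro S
  induction S with
  | nil => intro _ r s; simp
  | cons t S ih =>
    intro hnd r s
    have htS : t ∉ S := (List.nodup_cons.mp hnd).1
    simp only [List.foldl_cons]
    rw [ih (hnd.of_cons)]
    rw [PySem.Dict.getD_modify]
    by_cases hst : s = t
    · subst hst
      rw [if_pos rfl, if_neg htS, if_pos (List.mem_cons_self)]
      simp
    · rw [if_neg hst]
      have : (s ∈ t :: S) ↔ (s ∈ S) := by simp [List.mem_cons, hst]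
      rw [if_congr this rfl rfl]

theorem getD_bDeps (d : PySem.Dict Int (PySem.Set Int))
    (hv : ∀ p ∈ d.items, p.2.Nodup) (u : Int) :
    (bDeps d).getD u [] =
      (d.items.filter (fun p => decide (u ∈ p.2))).map (fun p => p.1) := by
  unfold bDeps
  have h : ∀ (ps : List (Int × PySem.Set Int)) (r : PySem.Dict Int (List Int)),
      (∀ p ∈ ps, p.2.Nodup) →
      (ps.foldl (fun r p => p.2.foldl (fun r s => r.modify s [] (fun l => l ++ [p.1])) r)
          r).getD u [] =
        r.getD u [] ++ (ps.filter (fun p => decide (u ∈ p.2))).map (fun p => p.1) := by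
    intro ps
    induction ps with
    | nil => intro r _; simp
    | cons p ps ih =>
      intro r hv'
      simp only [List.foldl_cons]
      rw [ih _ (fun q hq => hv' q (List.mem_cons_of_mem _ hq)),
        getD_foldl_modify_append p.1 p.2 (hv' p List.mem_cons_self)]
      by_cases hup : u ∈ p.2
      · simp [List.filter_cons, hup]
      · simp [List.filter_cons, hup]
  rw [h d.items PySem.Dict.empty hv, PySem.Dict.getD_empty]
  simp

theorem nodup_getD_bDeps (d : PySem.Dict Int (PySem.Set Int)) (hnd : d.keys.Nodup)
    (hv : ∀ p ∈ d.items, p.2.Nodup) (u : Int) :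
    ((bDeps d).getD u []).Nodup := by
  rw [getD_bDeps d hv u]
  have hsub : ((d.items.filter (fun p => decide (u ∈ p.2))).map (fun p => p.1)).Sublist
      (d.items.map (fun p => p.1)) := List.Sublist.map _ List.filter_sublist
  have hkeys : d.items.map (fun p => p.1) = d.keys := by
    simp [PySem.Dict.keys]
  exact (hkeys ▸ hnd).sublist hsub

theorem mem_getD_bDeps (d : PySem.Dict Int (PySem.Set Int)) (hnd : d.keys.Nodup)
    (hv : ∀ p ∈ d.items, p.2.Nodup) (u j : Int) :
    j ∈ (bDeps d).getD u [] ↔ ∃ S, d.get? j = some S ∧ u ∈ S := by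
  rw [getD_bDeps d hv u]
  constructor
  · intro h
    obtain ⟨p, hp, hpj⟩ := List.mem_map.mp h
    have hpf := List.mem_filter.mp hp
    subst hpj
    exact ⟨p.2, PySem.Dict.get?_of_mem_items d hpf.1 hnd, by simpa using hpf.2⟩
  · rintro ⟨S, hget, hu⟩
    exact List.mem_map.mpr ⟨(j, S),
      List.mem_filter.mpr ⟨PySem.Dict.mem_items_of_get?_eq_some d hget, by simpa using hu⟩, rfl⟩

-- bSupCount is the item-wise length table
theorem items_bSupCount (d : PySem.Dict Int (PySem.Set Int)) (hnd : d.keys.Nodup) :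
    (bSupCount d).items = d.items.map (fun p => (p.1, PySem.Set.len p.2)) := by
  unfold bSupCount
  have := PySem.Dict.items_foldl_insert_fresh (l := d.items) (k := fun p => p.1)
    (v := fun p => PySem.Set.len p.2) (d := PySem.Dict.empty)
    (by intro a _; exact PySem.Dict.contains_empty _)
    (by simpa [PySem.Dict.keys] using hnd)
  simpa using this

theorem keys_bSupCount (d : PySem.Dict Int (PySem.Set Int)) (hnd : d.keys.Nodup) :
    (bSupCount d).keys = d.keys := by
  simp only [PySem.Dict.keys, items_bSupCount d hnd, List.map_map]
  rfl

theorem getD_bSupCount (d : PySem.Dict Int (PySem.Set Int)) (hnd : d.keys.Nodup)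
    (j : Int) (S : PySem.Set Int) (hget : d.get? j = some S) :
    (bSupCount d).getD j 0 = PySem.Set.len S := by
  have hmem : (j, PySem.Set.len S) ∈ (bSupCount d).items := by
    rw [items_bSupCount d hnd]
    exact List.mem_map.mpr ⟨(j, S), PySem.Dict.mem_items_of_get?_eq_some d hget, rfl⟩
  exact PySem.Dict.getD_of_mem_items (bSupCount d) hmem (by rw [keys_bSupCount d hnd]; exact hnd) 0

theorem mem_zeros (d : PySem.Dict Int (PySem.Set Int)) (hnd : d.keys.Nodup) (x : Int) :
    x ∈ ((bSupCount d).items.filter (fun p => p.2 == 0)).map (fun p => p.1) ↔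
      d.get? x = some [] := by
  rw [items_bSupCount d hnd]
  constructor
  · intro h
    obtain ⟨p, hp, hpx⟩ := List.mem_map.mp h
    have hpf := List.mem_filter.mp hp
    obtain ⟨q, hq, hqp⟩ := List.mem_map.mp hpf.1
    have hlen : PySem.Set.len q.2 = 0 := by
      have := hpf.2
      rw [← hqp] at this
      simpa using this
    have hq2 : q.2 = [] := by
      unfold PySem.Set.len at hlen
      exact List.length_eq_zero_iff.mp (by exact_mod_cast hlen)
    have hx : q.1 = x := by rw [← hpx, ← hqp]
    have := PySem.Dict.get?_of_mem_items d hq hnd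
    rw [hx, hq2] at this
    exact this
  · intro hget
    refine List.mem_map.mpr ⟨(x, (0 : Int)), List.mem_filter.mpr ⟨?_, by simp⟩, rfl⟩
    exact List.mem_map.mpr ⟨(x, []), PySem.Dict.mem_items_of_get?_eq_some d hget, rfl⟩

-- one pass of the inner `for j in dependents.get(u, [])` loop
theorem bInner_spec (d : PySem.Dict Int (PySem.Set Int)) (bid u : Int) :
    ∀ (L : List Int) (rem : PySem.Dict Int Int) (fl : PySem.Set Int) (st : List Int),
      L.Nodup →
      (∀ j ∈ L, ∃ S, d.get? j = some S ∧ u ∈ S) →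
      fl.Nodup → bid ∈ fl → fl ⊆ bid :: d.keys →
      st.Nodup → (∀ x ∈ st, x ∈ fl) →
      (∀ x ∈ fl, Falls d bid x) →
      (∀ j S, d.get? j = some S → j ∉ fl →
        rem.getD j 0 = (cnt fl st S : Int) + (if j ∈ L then 1 else 0)) →
      (∀ j S, d.get? j = some S → j ∉ fl →
        (∃ s ∈ S, s ∉ fl ∨ s ∈ st) ∨ (u ∈ S ∧ j ∈ L)) →
      (L.foldl bStep (rem, fl, st)).2.1.Nodup ∧
      bid ∈ (L.foldl bStep (rem, fl, st)).2.1 ∧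
      (L.foldl bStep (rem, fl, st)).2.1 ⊆ bid :: d.keys ∧
      (L.foldl bStep (rem, fl, st)).2.2.Nodup ∧
      (∀ x ∈ (L.foldl bStep (rem, fl, st)).2.2, x ∈ (L.foldl bStep (rem, fl, st)).2.1) ∧
      (∀ x ∈ (L.foldl bStep (rem, fl, st)).2.1, Falls d bid x) ∧
      (∀ j S, d.get? j = some S → j ∉ (L.foldl bStep (rem, fl, st)).2.1 →
        (L.foldl bStep (rem, fl, st)).1.getD j 0 =
          (cnt (L.foldl bStep (rem, fl, st)).2.1 (L.foldl bStep (rem, fl, st)).2.2 S : Int)) ∧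
      (∀ j S, d.get? j = some S → j ∉ (L.foldl bStep (rem, fl, st)).2.1 →
        ∃ s ∈ S, s ∉ (L.foldl bStep (rem, fl, st)).2.1 ∨ s ∈ (L.foldl bStep (rem, fl, st)).2.2) ∧
      (L.foldl bStep (rem, fl, st)).2.2.length + fl.length =
        st.length + (L.foldl bStep (rem, fl, st)).2.1.length := by
  intro L
  induction L with
  | nil =>
    intro rem fl st _ _ hfnd hbid hsub hstnd hst hsound hcnt hprog
    refine ⟨hfnd, hbid, hsub, hstnd, hst, hsound, ?_, ?_, rfl⟩
    · intro j S hget hni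
      have := hcnt j S hget hni
      simpa using this
    · intro j S hget hni
      rcases hprog j S hget hni with h | ⟨_, hL⟩
      · exact h
      · cases hL
  | cons j L' ih =>
    intro rem fl st hLnd hL hfnd hbid hsub hstnd hst hsound hcnt hprog
    have hjL' : j ∉ L' := (List.nodup_cons.mp hLnd).1
    simp only [List.foldl_cons]
    by_cases hcj : fl.contains j = true
    · -- j already fallen: state unchanged
      have hjfl : j ∈ fl := (PySem.Set.contains_iff fl j).1 hcj
      have hstep : bStep (rem, fl, st) j = (rem, fl, st) := by
        unfold bStep
        rw [if_pos hcj]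
      rw [hstep]
      apply ih rem fl st (hLnd.of_cons) (fun i hi => hL i (List.mem_cons_of_mem _ hi))
        hfnd hbid hsub hstnd hst hsound
      · intro j' S hget hni
        have hne : j' ≠ j := by rintro rfl; exact hni hjfl
        have := hcnt j' S hget hni
        have hif : (if j' ∈ j :: L' then (1:Int) else 0) = (if j' ∈ L' then 1 else 0) :=
          if_congr (by simp [hne]) rfl rfl
        rwa [hif] at this
      · intro j' S hget hni
        rcases hprog j' S hget hni with h | ⟨hu, hmem⟩
        · exact Or.inl h
        · have hne : j' ≠ j := by rintro rfl; exact hni hjfl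
          rcases List.mem_cons.mp hmem with h1 | h1
          · exact absurd h1 hne
          · exact Or.inr ⟨hu, h1⟩
    · -- j not yet fallen: decrement its counter
      have hjfl : j ∉ fl := fun h => hcj ((PySem.Set.contains_iff fl j).2 h)
      obtain ⟨Sj, hgetj, huSj⟩ := hL j List.mem_cons_self
      have hremj : rem.getD j 0 = (cnt fl st Sj : Int) + 1 := by
        have := hcnt j Sj hgetj hjfl
        rwa [if_pos List.mem_cons_self] at this
      by_cases hr : (rem.getD j 0 - 1 == 0) = true
      · -- counter hits zero: j falls, push it
        have hcnt0 : cnt fl st Sj = 0 := by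
          have : rem.getD j 0 - 1 = 0 := beq_iff_eq.mp hr
          rw [hremj] at this
          omega
        have hSjfl : ∀ s ∈ Sj, s ∈ fl := fun s hs => ((cnt_eq_zero_iff fl st Sj).1 hcnt0 s hs).1
        have hstep : bStep (rem, fl, st) j =
            (rem.insert j (rem.getD j 0 - 1), PySem.Set.add fl j, j :: st) := by
          unfold bStep
          rw [if_neg (by simpa using hcj), if_pos hr]
        rw [hstep]
        have hjk : j ∈ d.keys := (mem_keys_iff_get? d j).2 ⟨Sj, hgetj⟩
        have hjst : j ∉ st := fun h => hjfl (hst j h)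
        obtain ⟨g1, g2, g3, g4, g5, g6, g7, g8, g9⟩ :=
          ih (rem.insert j (rem.getD j 0 - 1)) (PySem.Set.add fl j) (j :: st)
            (hLnd.of_cons) (fun i hi => hL i (List.mem_cons_of_mem _ hi))
            (PySem.Set.nodup_add fl j hfnd)
            ((PySem.Set.mem_add fl j bid).2 (Or.inl hbid))
            (by
              intro x hx
              rcases (PySem.Set.mem_add fl j x).1 hx with h | rfl
              · exact hsub h
              · exact List.mem_cons_of_mem _ hjk)
            (List.nodup_cons.mpr ⟨hjst, hstnd⟩)
            (by
              intro x hx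
              rcases List.mem_cons.mp hx with rfl | h
              · exact (PySem.Set.mem_add fl x x).2 (Or.inr rfl)
              · exact (PySem.Set.mem_add fl j x).2 (Or.inl (hst x h)))
            (by
              intro x hx
              rcases (PySem.Set.mem_add fl j x).1 hx with h | rfl
              · exact hsound x h
              · exact Falls.step x Sj hgetj (fun s hs => hsound s (hSjfl s hs)))
            (by
              intro j' S hget hni
              have hne : j' ≠ j := by
                rintro rfl
                exact hni ((PySem.Set.mem_add fl j' j').2 (Or.inr rfl))
              have hni' : j' ∉ fl := fun h => hni ((PySem.Set.mem_add fl j j').2 (Or.inl h))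
              have := hcnt j' S hget hni'
              have hif : (if j' ∈ j :: L' then (1:Int) else 0) = (if j' ∈ L' then 1 else 0) :=
                if_congr (by simp [hne]) rfl rfl
              rw [PySem.Dict.getD_insert_of_ne rem _ _ hne, this, cnt_push fl st S j hjfl, hif])
            (by
              intro j' S hget hni
              have hne : j' ≠ j := by
                rintro rfl
                exact hni ((PySem.Set.mem_add fl j' j').2 (Or.inr rfl))
              have hni' : j' ∉ fl := fun h => hni ((PySem.Set.mem_add fl j j').2 (Or.inl h))
              rcases hprog j' S hget hni' with ⟨s, hsS, hcase⟩ | ⟨hu, hmem⟩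
              · left
                refine ⟨s, hsS, ?_⟩
                rcases hcase with h | h
                · by_cases hsj : s = j
                  · subst hsj
                    exact Or.inr List.mem_cons_self
                  · exact Or.inl (fun hm =>
                      (by rcases (PySem.Set.mem_add fl j s).1 hm with h1 | h1
                          exacts [h h1, hsj h1] : False))
                · exact Or.inr (List.mem_cons_of_mem _ h)
              · rcases List.mem_cons.mp hmem with h1 | h1
                · exact absurd h1 hne
                · exact Or.inr ⟨hu, h1⟩)
        refine ⟨g1, g2, g3, g4, g5, g6, g7, g8, ?_⟩
        have hfl1 : (PySem.Set.add fl j).length = fl.length + 1 := by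
          rw [PySem.Set.add_of_not_mem hjfl, List.length_append, List.length_singleton]
        rw [hfl1] at g9
        simp only [List.length_cons] at g9 ⊢
        omega
      · -- counter still positive: only the decrement is recorded
        have hstep : bStep (rem, fl, st) j = (rem.insert j (rem.getD j 0 - 1), fl, st) := by
          unfold bStep
          rw [if_neg (by simpa using hcj), if_neg hr]
        rw [hstep]
        have hcntpos : cnt fl st Sj ≠ 0 := by
          intro h0
          apply hr
          rw [beq_iff_eq, hremj, h0]
          simp
        apply ih (rem.insert j (rem.getD j 0 - 1)) fl st (hLnd.of_cons)
          (fun i hi => hL i (List.mem_cons_of_mem _ hi)) hfnd hbid hsub hstnd hst hsound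
        · intro j' S hget hni
          by_cases hne : j' = j
          · subst hne
            have hS : S = Sj := by
              rw [hgetj] at hget
              exact Option.some.inj hget.symm
            subst hS
            rw [PySem.Dict.getD_insert_self, hremj, if_neg hjL']
            omega
          · have := hcnt j' S hget hni
            have hif : (if j' ∈ j :: L' then (1:Int) else 0) = (if j' ∈ L' then 1 else 0) :=
              if_congr (by simp [hne]) rfl rfl
            rw [PySem.Dict.getD_insert_of_ne rem _ _ hne, this, hif]
        · intro j' S hget hni
          by_cases hne : j' = j
          · subst hne
            have hS : S = Sj := by
              rw [hgetj] at hget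
              exact Option.some.inj hget.symm
            subst hS
            exact Or.inl (cnt_ne_zero fl st S hcntpos)
          · rcases hprog j' S hget hni with h | ⟨hu, hmem⟩
            · exact Or.inl h
            · rcases List.mem_cons.mp hmem with h1 | h1
              · exact absurd h1 hne
              · exact Or.inr ⟨hu, h1⟩

theorem bLoop_spec (d : PySem.Dict Int (PySem.Set Int)) (bid : Int) (hnd : d.keys.Nodup)
    (hv : ∀ p ∈ d.items, p.2.Nodup) :
    ∀ (fuel : Nat) (st : List Int) (rem : PySem.Dict Int Int) (fl : PySem.Set Int),
      fl.Nodup → bid ∈ fl → fl ⊆ bid :: d.keys →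
      st.Nodup → (∀ x ∈ st, x ∈ fl) →
      (∀ x ∈ fl, Falls d bid x) →
      (∀ j S, d.get? j = some S → j ∉ fl → rem.getD j 0 = (cnt fl st S : Int)) →
      (∀ j S, d.get? j = some S → j ∉ fl → ∃ s ∈ S, s ∉ fl ∨ s ∈ st) →
      d.keys.length + 1 + st.length ≤ fuel + fl.length →
      (bLoop (bDeps d) fuel rem st fl).Nodup ∧
      (∀ x ∈ bLoop (bDeps d) fuel rem st fl, Falls d bid x) ∧
      bid ∈ bLoop (bDeps d) fuel rem st fl ∧
      (∀ j S, d.get? j = some S → (∀ s ∈ S, s ∈ bLoop (bDeps d) fuel rem st fl) →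
        j ∈ bLoop (bDeps d) fuel rem st fl) := by
  intro fuel
  induction fuel with
  | zero =>
    intro st rem fl hfnd hbid hsub hstnd hst hsound hcnt hprog hfuel
    have hle : fl.length ≤ (bid :: d.keys).length := (hfnd.subperm hsub).length_le
    simp only [List.length_cons] at hle
    have hst0 : st = [] := List.length_eq_zero_iff.mp (by omega)
    subst hst0
    refine ⟨hfnd, hsound, hbid, ?_⟩
    intro j S hget hall
    by_contra hni
    obtain ⟨s, hsS, hcase⟩ := hprog j S hget hni
    rcases hcase with h | h
    · exact h (hall s hsS)
    · cases h
  | succ f ih =>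
    intro st rem fl hfnd hbid hsub hstnd hst hsound hcnt hprog hfuel
    cases st with
    | nil =>
      refine ⟨hfnd, hsound, hbid, ?_⟩
      intro j S hget hall
      by_contra hni
      obtain ⟨s, hsS, hcase⟩ := hprog j S hget hni
      rcases hcase with h | h
      · exact h (hall s hsS)
      · cases h
    | cons u rest =>
      have hres : bLoop (bDeps d) (f + 1) rem (u :: rest) fl =
          bLoop (bDeps d) f (((bDeps d).getD u []).foldl bStep (rem, fl, rest)).1
            (((bDeps d).getD u []).foldl bStep (rem, fl, rest)).2.2
            (((bDeps d).getD u []).foldl bStep (rem, fl, rest)).2.1 := by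
        conv_lhs => rw [bLoop]
      rw [hres]
      have hufl : u ∈ fl := hst u List.mem_cons_self
      have hurest : u ∉ rest := (List.nodup_cons.mp hstnd).1
      have hvget : ∀ j S, d.get? j = some S → S.Nodup := fun j S hget =>
        hv (j, S) (PySem.Dict.mem_items_of_get?_eq_some d hget)
      obtain ⟨g1, g2, g3, g4, g5, g6, g7, g8, g9⟩ :=
        bInner_spec d bid u ((bDeps d).getD u []) rem fl rest
          (nodup_getD_bDeps d hnd hv u)
          (fun i hi => (mem_getD_bDeps d hnd hv u i).1 hi)
          hfnd hbid hsub (hstnd.of_cons)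
          (fun x hx => hst x (List.mem_cons_of_mem _ hx)) hsound
          (by
            intro j S hget hni
            have h1 := hcnt j S hget hni
            rw [cnt_pop fl rest u hufl hurest S (hvget j S hget)] at h1
            rw [h1]
            have hiff : u ∈ S ↔ j ∈ (bDeps d).getD u [] := by
              rw [mem_getD_bDeps d hnd hv u j]
              exact ⟨fun h => ⟨S, hget, h⟩,
                fun ⟨S', hget', hu'⟩ => by rw [hget] at hget'; exact Option.some.inj hget' ▸ hu'⟩
            rw [show ((cnt fl rest S + if u ∈ S then 1 else 0 : Nat) : Int) =
                (cnt fl rest S : Int) + (if u ∈ S then 1 else 0 : Int) by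
              split <;> push_cast <;> ring]
            rw [if_congr hiff rfl rfl])
          (by
            intro j S hget hni
            obtain ⟨s, hsS, hcase⟩ := hprog j S hget hni
            rcases hcase with h | h
            · exact Or.inl ⟨s, hsS, Or.inl h⟩
            · rcases List.mem_cons.mp h with rfl | h1
              · exact Or.inr ⟨hsS, (mem_getD_bDeps d hnd hv s j).2 ⟨S, hget, hsS⟩⟩
              · exact Or.inl ⟨s, hsS, Or.inr h1⟩)
      apply ih _ _ _ g1 g2 g3 g4 g5 g6 g7 g8
      simp only [List.length_cons] at hfuel
      omega

-- every fallen-closed superset of {bid} contains every Falls element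
theorem falls_subset (d : PySem.Dict Int (PySem.Set Int)) (bid : Int) (R : List Int)
    (hb : bid ∈ R) (hc : ∀ i S, d.get? i = some S → (∀ s ∈ S, s ∈ R) → i ∈ R) :
    ∀ x, Falls d bid x → x ∈ R := by
  intro x hf
  induction hf with
  | base => exact hb
  | step i S hget _ ihs => exact hc i S hget (fun s hsS => ihs s hsS)

-- ===== VERDICT (by name: the statement is the Claim_ definition above) =====
theorem count_above_spec : Claim_equal_count_above := by
  intro hierarchy bid _
  unfold Spec_count_above count_above count_above_alt
  have hnd := nodup_keys_pyDictOf hierarchy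
  have hv := values_nodup_pyDictOf hierarchy
  set d := pyDictOf hierarchy with hd
  -- A side
  have hof : PySem.Set.ofList [bid] = [bid] :=
    PySem.Set.ofList_eq_self_of_nodup [bid] (List.nodup_singleton bid)
  obtain ⟨hAnd, hAsound, hAbid, hAclosed⟩ :=
    aLoop_spec d bid hnd (d.keys.length + 1) (PySem.Set.ofList [bid])
      (by rw [hof]; exact List.nodup_singleton bid)
      (by rw [hof]; exact List.mem_singleton.mpr rfl)
      (by
        rw [hof]
        intro x hx
        rw [List.mem_singleton] at hx
        rw [hx]
        exact List.mem_cons_self)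
      (by
        rw [hof]
        intro x hx
        rw [List.mem_singleton] at hx
        rw [hx]
        exact Falls.base)
      (by rw [hof]; simp)
  -- B side: initial fallen set and queue
  set fl0 : PySem.Set Int := PySem.Set.add (PySem.Set.ofList
    (((bSupCount d).items.filter (fun p => p.2 == 0)).map (fun p => p.1))) bid with hfl0
  have hmemfl0 : ∀ x, x ∈ fl0 ↔ x = bid ∨ d.get? x = some [] := by
    intro x
    rw [hfl0, PySem.Set.mem_add, PySem.Set.mem_ofList, mem_zeros d hnd x]
    tauto
  obtain ⟨hBnd, hBsound, hBbid, hBclosed⟩ :=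
    bLoop_spec d bid hnd hv (2 * d.keys.length + 2) fl0.reverse (bSupCount d) fl0
      (by
        rw [hfl0]
        exact PySem.Set.nodup_add _ bid (PySem.Set.nodup_ofList _))
      ((hmemfl0 bid).2 (Or.inl rfl))
      (by
        intro x hx
        rcases (hmemfl0 x).1 hx with rfl | h
        · exact List.mem_cons_self
        · exact List.mem_cons_of_mem _ ((mem_keys_iff_get? d x).2 ⟨[], h⟩))
      (by
        rw [hfl0]
        exact List.nodup_reverse.mpr (PySem.Set.nodup_add _ bid (PySem.Set.nodup_ofList _)))
      (fun x hx => List.mem_reverse.mp hx)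
      (by
        intro x hx
        rcases (hmemfl0 x).1 hx with rfl | h
        · exact Falls.base
        · exact Falls.step x [] h (by intro s hs; cases hs))
      (by
        intro j S hget hni
        rw [getD_bSupCount d hnd j S hget,
          cnt_eq_length fl0 fl0.reverse S (fun x => List.mem_reverse.symm)]
        unfold PySem.Set.len
        rfl)
      (by
        intro j S hget hni
        cases S with
        | nil => exact absurd ((hmemfl0 j).2 (Or.inr hget)) hni
        | cons s S' =>
          refine ⟨s, List.mem_cons_self, ?_⟩
          by_cases hs : s ∈ fl0
          · exact Or.inr (List.mem_reverse.mpr hs)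
          · exact Or.inl hs)
      (by rw [List.length_reverse]; omega)
  -- both results are the same finite set, hence the same count
  have hperm : (aLoop d (d.keys.length + 1) (PySem.Set.ofList [bid])).Perm
      (bLoop (bDeps d) (2 * d.keys.length + 2) (bSupCount d) fl0.reverse fl0) := by
    rw [List.perm_ext_iff_of_nodup hAnd hBnd]
    intro a
    constructor
    · intro h
      exact falls_subset d bid _ hBbid hBclosed a (hAsound a h)
    · intro h
      exact falls_subset d bid _ hAbid hAclosed a (hBsound a h)
  have hlen := hperm.length_eq
  simp only [PySem.Set.len]
  rw [hlen]
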